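-- pv_equiv track=rewrite | github.com/akashnag/ash | src/ash/core/utils.py | soft_wrap
-- ===== SOURCE A (Python) =====
-- def str_reverse(text):
-- 	rtext = ""
-- 	n = len(text)
-- 	for i in range(n):
-- 		rtext += text[n-i-1]
-- 	return rtext
--
-- def soft_wrap(text, width, break_words):
-- 	# assumes 'text' does not contain newlines
-- 	if("\n" in text): raise(Exception("Newline found during wrap operation!"))
--
-- 	separators = "~!@#$%^&*()-=+\\|[{]};:,<.>/? \t\n"
-- 	text += "\n"		# append newline to make life easier
-- 	n = len(text) - 1
-- 	lines = list()
-- 	while(n > width):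
-- 		sub = text[0:width]
-- 		if(sub[-1] in separators or text[width] == "\n"):
-- 			# we are lucky to have the line end in a separator
-- 			lines.append(sub)
-- 			text = text[width:]
-- 			n -= width
-- 			if(text == "\n"): text = ""
-- 		else:
-- 			ls = len(sub)
-- 			rsub = str_reverse(sub)
-- 			index = next((i for i, ch in enumerate(rsub) if ch in separators), None)
-- 			if(index == None):
-- 				# no separator found before intended line-break
-- 				if(break_words):
-- 					# breaking words are allowed: switch to hard-wrap
-- 					lines.append(sub)
-- 					text = text[width:]
-- 					n -= width
-- 					if(text == "\n"): text = ""
-- 				else: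
-- 					# breaking words are not allowed: find next separator position
-- 					index = next((i for i, ch in enumerate(text) if ch in separators), None)
-- 					# index will never be None bcoz we have appended newline to end
-- 					if(text[index] == "\n"):
-- 						lines.append(text[0:index])
-- 						text = ""
-- 						n = 0
-- 					else:
-- 						sub = text[0:index+1]
-- 						text = text[index+1:]
-- 						lines.append(sub)
-- 						n -= index+1
-- 			else:
-- 				sub = text[0:ls-index]
-- 				lines.append(sub)
-- 				text = text[ls-index:]
-- 				n -= (ls-index)
--
-- 	lines.append(text[0:n])
-- 	return lines
-- ===== SOURCE B (Python) =====
-- def soft_wrap(text, width, break_words):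
-- 	# O(n) rewrite: a cursor into the original string instead of repeated reslicing;
-- 	# separator membership via a set; explicit backward/forward scans for break points.
-- 	if("\n" in text): raise(Exception("Newline found during wrap operation!"))
-- 	seps = set("~!@#$%^&*()-=+\\|[{]};:,<.>/? \t\n")
-- 	lines = []
-- 	i, n = 0, len(text)
-- 	while n - i > width:
-- 		if text[i + width - 1] in seps:
-- 			lines.append(text[i:i + width])
-- 			i += width
-- 		else:
-- 			j = i + width - 1
-- 			while j >= i and text[j] not in seps:
-- 				j -= 1
-- 			if j < i:
-- 				# no separator inside the window
-- 				if break_words: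
-- 					lines.append(text[i:i + width])
-- 					i += width
-- 				else:
-- 					k = i + width
-- 					while k < n and text[k] not in seps:
-- 						k += 1
-- 					if k == n:
-- 						lines.append(text[i:])
-- 						i = n
-- 					else:
-- 						lines.append(text[i:k + 1])
-- 						i = k + 1
-- 			else:
-- 				lines.append(text[i:j + 1])
-- 				i = j + 1
-- 	lines.append(text[i:])
-- 	return lines
-- ===== Notes on version B (the rewrite author's own statement) =====
-- stated objective: faster
-- what changed: Replaces A's repeated string reslicing, string reversal and linear re-searches per emitted line with a single integer cursor into the original string, set-based separator membership, and direct backward/forward index scans, making the whole wrap one O(n) pass.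
-- outside the precondition, e.g. on soft_wrap('', 0, False): A returns [''], B returns ['']
import Mathlib
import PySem

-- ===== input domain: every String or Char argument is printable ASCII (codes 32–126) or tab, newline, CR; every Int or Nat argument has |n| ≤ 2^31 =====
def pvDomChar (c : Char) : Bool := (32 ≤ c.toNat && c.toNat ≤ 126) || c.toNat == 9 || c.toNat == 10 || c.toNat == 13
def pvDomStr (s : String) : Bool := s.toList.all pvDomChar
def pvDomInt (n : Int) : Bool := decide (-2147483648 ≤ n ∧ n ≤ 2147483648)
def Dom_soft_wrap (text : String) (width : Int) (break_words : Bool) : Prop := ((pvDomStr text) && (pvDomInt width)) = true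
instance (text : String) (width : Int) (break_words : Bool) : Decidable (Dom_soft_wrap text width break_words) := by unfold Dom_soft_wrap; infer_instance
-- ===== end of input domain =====

-- B replaces A's repeated string reslicing/reversing with a single cursor and direct
-- backward/forward scans (O(n) instead of O(n^2)); same return value on all of Pre_.

-- ===== PORT A =====
def pvSeps : List Char := "~!@#$%^&*()-=+\\|[{]};:,<.>/? \t\n".toList

-- port of str_reverse: rtext += text[n-i-1] over range(n) (index always in range, default never used)
def strReverseChars (t : List Char) : List Char :=
  (List.range t.length).foldl
    (fun r (i : Nat) => r ++ [PySem.List.pyGetD t ((t.length : Int) - (i : Int) - 1) ' ']) []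

-- the while-loop of A; fuel only makes the recursion structural (enough fuel is supplied on Pre_)
def loopA (bw : Bool) (w : Int) :
    Nat → List Char → Int → List (List Char) → List Char × Int × List (List Char)
  | 0, t, n, acc => (t, n, acc)
  | fuel+1, t, n, acc =>
    if n > w then
      let sub := PySem.List.slice t (some 0) (some w)
      if (PySem.List.pyGet? sub (-1)).any (pvSeps.contains ·)
          || (PySem.List.pyGet? t w == some '\n') then
        let t2 := PySem.List.slice t (some w) none
        loopA bw w fuel (if t2 = ['\n'] then [] else t2) (n - w) (acc ++ [sub])
      else
        match (strReverseChars sub).findIdx? (pvSeps.contains ·) with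
        | some idx =>
          let cut : Int := (sub.length : Int) - (idx : Int)
          loopA bw w fuel (PySem.List.slice t (some cut) none) (n - cut)
            (acc ++ [PySem.List.slice t (some 0) (some cut)])
        | none =>
          if bw then
            let t2 := PySem.List.slice t (some w) none
            loopA bw w fuel (if t2 = ['\n'] then [] else t2) (n - w) (acc ++ [sub])
          else
            match t.findIdx? (pvSeps.contains ·) with
            | none => (t, n, acc)  -- unreachable: Python would raise (text[None]); '\n' is always present
            | some idx =>
              if PySem.List.pyGet? t (idx : Int) == some '\n' then
                loopA bw w fuel [] 0 (acc ++ [PySem.List.slice t (some 0) (some (idx : Int))])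
              else
                loopA bw w fuel (PySem.List.slice t (some ((idx : Int) + 1)) none)
                  (n - ((idx : Int) + 1))
                  (acc ++ [PySem.List.slice t (some 0) (some ((idx : Int) + 1))])
    else (t, n, acc)

def soft_wrap (text : String) (width : Int) (break_words : Bool) : List String :=
  if PySem.Str.isIn "\n" text then []  -- Python raises Exception here; excluded by Pre_
  else
    let t := text.toList ++ ['\n']
    let r := loopA break_words width (t.length + 1) t ((t.length : Int) - 1) []
    (r.2.2 ++ [PySem.List.slice r.1 (some 0) (some r.2.1)]).map String.ofList

-- ===== PORT B =====
def pvSepSet : PySem.Set Char := PySem.Set.ofList pvSeps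

-- while j >= i and text[j] not in seps: j -= 1
def scanBack (s : List Char) (i : Int) : Int → Nat → Int
  | j, 0 => j
  | j, fuel+1 =>
    if i ≤ j ∧ pvSepSet.contains (PySem.List.pyGetD s j ' ') = false then
      scanBack s i (j - 1) fuel
    else j

-- while k < n and text[k] not in seps: k += 1
def scanFwd (s : List Char) (n : Int) : Int → Nat → Int
  | k, 0 => k
  | k, fuel+1 =>
    if k < n ∧ pvSepSet.contains (PySem.List.pyGetD s k ' ') = false then
      scanFwd s n (k + 1) fuel
    else k

def loopB (s : List Char) (bw : Bool) (w : Int) (n : Int) :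
    Nat → Int → List (List Char) → Int × List (List Char)
  | 0, i, acc => (i, acc)
  | fuel+1, i, acc =>
    if n - i > w then
      if pvSepSet.contains (PySem.List.pyGetD s (i + w - 1) ' ') then
        loopB s bw w n fuel (i + w) (acc ++ [PySem.List.slice s (some i) (some (i + w))])
      else
        let j := scanBack s i (i + w - 1) (w.toNat + 1)
        if j < i then
          if bw then
            loopB s bw w n fuel (i + w) (acc ++ [PySem.List.slice s (some i) (some (i + w))])
          else
            let k := scanFwd s n (i + w) (s.length + 1)
            if k = n then
              loopB s bw w n fuel n (acc ++ [PySem.List.slice s (some i) none])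
            else
              loopB s bw w n fuel (k + 1) (acc ++ [PySem.List.slice s (some i) (some (k + 1))])
        else
          loopB s bw w n fuel (j + 1) (acc ++ [PySem.List.slice s (some i) (some (j + 1))])
    else (i, acc)

def soft_wrap_alt (text : String) (width : Int) (break_words : Bool) : List String :=
  if PySem.Str.isIn "\n" text then []  -- same explicit raise as in A's source; excluded by Pre_
  else
    let s := text.toList
    let r := loopB s break_words width (s.length : Int) (s.length + 1) 0 []
    (r.2 ++ [PySem.List.slice s (some r.1) none]).map String.ofList

-- ===== PRECONDITION & SPEC =====
-- Pre_ excludes texts containing a newline (A raises Exception) and widths ≤ 0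
-- (A raises IndexError on every such input except the trivial ('', 0) corner, where both return ['']).
def Pre_soft_wrap (text : String) (width : Int) (break_words : Bool) : Prop :=
  PySem.Str.isIn "\n" text = false ∧ 1 ≤ width
instance (text : String) (width : Int) (break_words : Bool) : Decidable (Pre_soft_wrap text width break_words) := by unfold Pre_soft_wrap; infer_instance

def pvWitness_soft_wrap : String × Int × Bool := ("hello wonderful world, ok", 8, false)

def Spec_soft_wrap (text : String) (width : Int) (break_words : Bool) (out : List String) : Prop := out = soft_wrap_alt text width break_words
instance (text : String) (width : Int) (break_words : Bool) (out : List String) : Decidable (Spec_soft_wrap text width break_words out) := by unfold Spec_soft_wrap; infer_instance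

-- ===== CLAIM (what is proved, stated in full; the proofs are below) =====
def Claim_equal_soft_wrap : Prop := ∀ (text : String) (width : Int) (break_words : Bool), Dom_soft_wrap text width break_words → Pre_soft_wrap text width break_words → Spec_soft_wrap text width break_words (soft_wrap text width break_words)

-- ===== LEMMAS AND PROOFS =====

-- the two membership tests agree ('c in separators' on the string vs on the set built from it)
theorem sep_eq (c : Char) : pvSepSet.contains c = pvSeps.contains c := by
  by_cases h : c ∈ pvSeps
  · simp [pvSepSet, (PySem.Set.mem_ofList pvSeps c).2 h, h]
  · simp [pvSepSet, h, (PySem.Set.mem_ofList pvSeps c).not.2 h]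

-- A's hand-rolled str_reverse reverses
theorem strRev_eq (t : List Char) : strReverseChars t = t.reverse := by
  unfold strReverseChars
  rw [PySem.List.foldl_append_singleton_eq_map, List.nil_append]
  apply List.ext_getElem (by simp)
  intro i h1 h2
  have hi : i < t.length := by simpa using h2
  simp only [List.getElem_map, List.getElem_range, List.getElem_reverse]
  rw [show ((t.length : Int) - ((i : Nat) : Int) - 1) = ((t.length - 1 - i : Nat) : Int) by omega,
      PySem.List.pyGetD_natCast, List.getD_eq_getElem?_getD,
      List.getElem?_eq_getElem (by omega)]
  rfl

-- the final 'lines.append(...)' of each version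
def finishA (r : List Char × Int × List (List Char)) : List (List Char) :=
  r.2.2 ++ [PySem.List.slice r.1 (some 0) (some r.2.1)]
def finishB (s : List Char) (r : Int × List (List Char)) : List (List Char) :=
  r.2 ++ [PySem.List.slice s (some r.1) none]

-- B's backward scan = first separator index in the reversed window (what A computes)
theorem scanBack_spec (s : List Char) (i : Nat) :
    ∀ (rl : List Char) (fuel : Nat), rl.length ≤ fuel →
    (∀ d : Nat, (hd : d < rl.length) →
        PySem.List.pyGetD s ((i : Int) + rl.length - 1 - d) ' ' = rl[d]) →
    scanBack s (i : Int) ((i : Int) + rl.length - 1) fuel =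
      match rl.findIdx? (pvSeps.contains ·) with
      | some c => (i : Int) + rl.length - 1 - c
      | none => (i : Int) - 1 := by
  intro rl
  induction rl with
  | nil =>
    intro fuel _ _
    have hj : (i : Int) + (([] : List Char).length : Int) - 1 = (i : Int) - 1 := by simp
    rw [hj]
    have hrun : scanBack s (i : Int) ((i : Int) - 1) fuel = (i : Int) - 1 := by
      cases fuel with
      | zero => rfl
      | succ f =>
        simp only [scanBack]
        rw [if_neg (fun h => absurd h.1 (by omega))]
    rw [hrun]
    simp
  | cons c rl' ih =>
    intro fuel hf hidx
    obtain ⟨f, rfl⟩ : ∃ m, fuel = m + 1 := ⟨fuel - 1, by simp at hf; omega⟩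
    have hj : (i : Int) + ((c :: rl').length : Int) - 1 = (i : Int) + (rl'.length : Int) := by
      simp; ring
    have hc : PySem.List.pyGetD s ((i : Int) + (rl'.length : Int)) ' ' = c := by
      have h0 := hidx 0 (by simp)
      rw [show ((i : Int) + ((c :: rl').length : Int) - 1 - ((0 : Nat) : Int))
            = (i : Int) + (rl'.length : Int) by simp; ring] at h0
      simpa using h0
    rw [hj]
    simp only [scanBack]
    by_cases hsep : pvSeps.contains c
    · rw [if_neg (fun h => by
        have h2 := h.2
        rw [hc, sep_eq, hsep] at h2
        exact absurd h2 (by simp))]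
      rw [List.findIdx?_cons, if_pos hsep]
      simp
    · have hsep' : pvSeps.contains c = false := by simpa using hsep
      rw [if_pos ⟨by omega, by rw [hc, sep_eq, hsep']⟩]
      have hidx' : ∀ d : Nat, (hd : d < rl'.length) →
          PySem.List.pyGetD s ((i : Int) + (rl'.length : Int) - 1 - d) ' ' = rl'[d] := by
        intro d hd
        have h1 := hidx (d + 1) (by simp; omega)
        rw [show ((i : Int) + ((c :: rl').length : Int) - 1 - ((d + 1 : Nat) : Int))
              = (i : Int) + (rl'.length : Int) - 1 - d by push_cast; simp; ring] at h1
        simpa using h1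
      rw [ih f (by simp at hf; omega) hidx']
      rw [List.findIdx?_cons, if_neg (by rw [hsep']; simp)]
      cases hfi : rl'.findIdx? (pvSeps.contains ·) with
      | none => simp
      | some cx => simp; push_cast; ring

-- B's forward scan = A's first-separator search in the rest of the text
theorem scanFwd_spec (s : List Char) :
    ∀ (fuel : Nat) (k : Nat), k ≤ s.length → s.length - k < fuel →
    scanFwd s (s.length : Int) (k : Int) fuel =
      match (s.drop k).findIdx? (pvSeps.contains ·) with
      | some d => ((k + d : Nat) : Int)
      | none => (s.length : Int) := by
  intro fuel
  induction fuel with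
  | zero => intro k _ hfl; exact absurd hfl (Nat.not_lt_zero _)
  | succ f ih =>
    intro k hk hfl
    by_cases hend : k = s.length
    · subst hend
      simp only [scanFwd]
      rw [if_neg (fun h => absurd h.1 (by omega))]
      simp [List.drop_length]
    · have hklt : k < s.length := by omega
      obtain ⟨ck, hck⟩ : ∃ c, s[k]? = some c := ⟨_, List.getElem?_eq_getElem hklt⟩
      have hgetD : PySem.List.pyGetD s ((k : Nat) : Int) ' ' = ck := by
        rw [PySem.List.pyGetD_natCast, List.getD_eq_getElem?_getD, hck]; rfl
      have hkval : s[k]'hklt = ck := by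
        have h1 := List.getElem?_eq_getElem hklt
        rw [hck] at h1
        exact (Option.some.inj h1).symm
      have hdropk : s.drop k = ck :: s.drop (k + 1) := by
        rw [List.drop_eq_getElem_cons hklt, hkval]
      simp only [scanFwd]
      by_cases hsep : pvSeps.contains ck
      · rw [if_neg (fun h => by
          have h2 := h.2
          rw [hgetD, sep_eq, hsep] at h2
          exact absurd h2 (by simp))]
        rw [hdropk, List.findIdx?_cons, if_pos hsep]
        show ((k : Nat) : Int) = ((k + 0 : Nat) : Int)
        simp
      · have hsep' : pvSeps.contains ck = false := by simpa using hsep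
        rw [if_pos ⟨by exact_mod_cast hklt, by rw [hgetD, sep_eq, hsep']⟩]
        rw [show ((k : Nat) : Int) + 1 = ((k + 1 : Nat) : Int) by push_cast; ring]
        rw [ih (k + 1) (by omega) (by omega)]
        rw [hdropk, List.findIdx?_cons, if_neg (by rw [hsep']; simp)]
        cases hfi : (s.drop (k + 1)).findIdx? (pvSeps.contains ·) with
        | none => simp
        | some d => simp; push_cast; ring

theorem loop_eq (s : List Char) (bw : Bool) (wn : Nat) (hw : 1 ≤ wn) (hnl : '\n' ∉ s) :
    ∀ (k : Nat), ∀ (i : Nat) (acc : List (List Char)) (fa fb : Nat),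
    i + k = s.length → k < fa → k < fb →
    finishA (loopA bw (wn : Int) fa (s.drop i ++ ['\n']) (k : Int) acc) =
    finishB s (loopB s bw (wn : Int) (s.length : Int) fb (i : Int) acc) := by
  intro k
  induction k using Nat.strong_induction_on with
  | _ k IH =>
  intro i acc fa fb hik hfa hfb
  obtain ⟨fa', rfl⟩ : ∃ m, fa = m + 1 := ⟨fa - 1, by omega⟩
  obtain ⟨fb', rfl⟩ : ∃ m, fb = m + 1 := ⟨fb - 1, by omega⟩
  have hdlen : (s.drop i).length = k := by rw [List.length_drop]; omega
  simp only [loopA, loopB]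
  by_cases hgt : wn < k
  case neg =>
    rw [if_neg (show ¬((k : Int) > (wn : Int)) by omega),
        if_neg (show ¬((s.length : Int) - (i : Int) > (wn : Int)) by omega)]
    show acc ++ [PySem.List.slice (s.drop i ++ ['\n']) (some 0) (some (k : Int))]
        = acc ++ [PySem.List.slice s (some (i : Int)) none]
    rw [PySem.List.slice_zero_start, PySem.List.slice_to_natCast,
        List.take_append_of_le_length (by omega), List.take_of_length_le (by omega),
        PySem.List.slice_from_natCast]
  case pos =>
    rw [if_pos (show (k : Int) > (wn : Int) by omega),
        if_pos (show (s.length : Int) - (i : Int) > (wn : Int) by omega)]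
    have hsub : PySem.List.slice (s.drop i ++ ['\n']) (some 0) (some (wn : Int))
        = (s.drop i).take wn := by
      rw [PySem.List.slice_zero_start, PySem.List.slice_to_natCast,
          List.take_append_of_le_length (by omega)]
    rw [hsub]
    have hsublen : ((s.drop i).take wn).length = wn := by
      rw [List.length_take, hdlen]; omega
    obtain ⟨c1, hc1⟩ : ∃ c, s[i + wn - 1]? = some c := ⟨_, List.getElem?_eq_getElem (by omega)⟩
    have hA1 : PySem.List.pyGet? ((s.drop i).take wn) (-1) = some c1 := by
      rw [PySem.List.pyGet?_neg_one, List.getLast?_eq_getElem?, hsublen,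
          List.getElem?_take_of_lt (by omega), List.getElem?_drop,
          show i + (wn - 1) = i + wn - 1 by omega]
      exact hc1
    obtain ⟨c2, hc2⟩ : ∃ c, s[i + wn]? = some c := ⟨_, List.getElem?_eq_getElem (by omega)⟩
    have hc2nl : c2 ≠ '\n' := fun h => hnl (h ▸ List.mem_of_getElem? hc2)
    have hA2f : (PySem.List.pyGet? (s.drop i ++ ['\n']) (wn : Int) == some '\n') = false := by
      rw [PySem.List.pyGet?_natCast, List.getElem?_append_left (by omega), List.getElem?_drop, hc2]
      simp [hc2nl]
    have hB1 : PySem.List.pyGetD s ((i : Int) + (wn : Int) - 1) ' ' = c1 := by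
      rw [show (i : Int) + (wn : Int) - 1 = ((i + wn - 1 : Nat) : Int) by omega,
          PySem.List.pyGetD_natCast, List.getD_eq_getElem?_getD, hc1]
      rfl
    simp only [hA1, Option.any_some, hA2f, Bool.or_false, hB1, sep_eq]
    have htail : PySem.List.slice (s.drop i ++ ['\n']) (some (wn : Int)) none
        = s.drop (i + wn) ++ ['\n'] := by
      rw [PySem.List.slice_from_natCast, List.drop_append_of_le_length (by omega), List.drop_drop]
    have hnotnl : (s.drop (i + wn) ++ ['\n']) ≠ ['\n'] := by
      intro h
      have hl := congrArg List.length h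
      simp [List.length_drop] at hl
      omega
    have hBslice : PySem.List.slice s (some (i : Int)) (some ((i : Int) + (wn : Int)))
        = (s.drop i).take wn := by
      rw [show (i : Int) + (wn : Int) = ((i + wn : Nat) : Int) by push_cast; ring,
          PySem.List.slice_natCast, show i + wn - i = wn by omega]
    have hrecW : finishA (loopA bw (wn : Int) fa' (s.drop (i + wn) ++ ['\n'])
          ((k : Int) - (wn : Int)) (acc ++ [(s.drop i).take wn]))
        = finishB s (loopB s bw (wn : Int) (s.length : Int) fb'
          ((i : Int) + (wn : Int)) (acc ++ [(s.drop i).take wn])) := by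
      have h := IH (k - wn) (by omega) (i + wn) (acc ++ [(s.drop i).take wn]) fa' fb'
        (by omega) (by omega) (by omega)
      rw [show ((k - wn : Nat) : Int) = (k : Int) - (wn : Int) by omega,
          show ((i + wn : Nat) : Int) = (i : Int) + (wn : Int) by push_cast; ring] at h
      exact h
    by_cases hsep1 : pvSeps.contains c1
    · rw [if_pos hsep1, if_pos hsep1, htail, if_neg hnotnl, hBslice]
      exact hrecW
    · have hsep1' : pvSeps.contains c1 = false := by simpa using hsep1
      rw [if_neg (show ¬(pvSeps.contains c1 = true) by rw [hsep1']; simp),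
          if_neg (show ¬(pvSeps.contains c1 = true) by rw [hsep1']; simp)]
      rw [strRev_eq]
      have hrevlen : (((s.drop i).take wn).reverse).length = wn := by
        rw [List.length_reverse]; exact hsublen
      rw [show ((wn : Int)).toNat = wn from Int.toNat_natCast wn]
      have hscanB := scanBack_spec s i (((s.drop i).take wn).reverse) (wn + 1)
        (by rw [hrevlen]; omega)
        (by
          intro d hd
          rw [hrevlen] at hd
          have hval : (((s.drop i).take wn).reverse)[d]? = s[i + (wn - 1 - d)]? := by
            rw [List.getElem?_reverse (by rw [hsublen]; omega), hsublen,
                List.getElem?_take_of_lt (by omega), List.getElem?_drop]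
          rw [hrevlen, show ((i : Int) + (wn : Int) - 1 - (d : Int))
                = ((i + (wn - 1 - d) : Nat) : Int) by omega,
              PySem.List.pyGetD_natCast, List.getD_eq_getElem?_getD, ← hval,
              List.getElem?_eq_getElem (by rw [List.length_reverse, hsublen]; omega)]
          rfl)
      rw [hrevlen] at hscanB
      rw [hscanB]
      cases hfind : (((s.drop i).take wn).reverse).findIdx? (pvSeps.contains ·) with
      | some idx =>
        dsimp only
        have hidxlt : idx < wn := by
          rcases List.findIdx?_eq_some_iff_getElem.mp hfind with ⟨hlt, _, _⟩
          rwa [hrevlen] at hlt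
        rw [if_neg (show ¬((i : Int) + (wn : Int) - 1 - (idx : Int) < (i : Int)) by omega)]
        rw [hsublen]
        rw [show (wn : Int) - (idx : Int) = ((wn - idx : Nat) : Int) by omega]
        rw [PySem.List.slice_from_natCast, List.drop_append_of_le_length (by omega), List.drop_drop]
        rw [PySem.List.slice_zero_start, PySem.List.slice_to_natCast,
            List.take_append_of_le_length (by omega)]
        rw [show (i : Int) + (wn : Int) - 1 - (idx : Int) + 1 = ((i + (wn - idx) : Nat) : Int) by omega]
        rw [PySem.List.slice_natCast, show i + (wn - idx) - i = wn - idx by omega]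
        have h := IH (k - (wn - idx)) (by omega) (i + (wn - idx))
          (acc ++ [(s.drop i).take (wn - idx)]) fa' fb' (by omega) (by omega) (by omega)
        rw [show ((k - (wn - idx) : Nat) : Int) = (k : Int) - ((wn - idx : Nat) : Int) by omega] at h
        exact h
      | none =>
        dsimp only
        rw [if_pos (show (i : Int) - 1 < (i : Int) by omega)]
        have hnosub : ∀ x ∈ (s.drop i).take wn, pvSeps.contains x = false := fun x hx =>
          List.findIdx?_eq_none_iff.mp hfind x (List.mem_reverse.mpr hx)
        cases bw with
        | true =>
          rw [if_pos (show (true : Bool) = true from rfl), if_pos (show (true : Bool) = true from rfl),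
              htail, if_neg hnotnl, hBslice]
          exact hrecW
        | false =>
          rw [if_neg (show ¬((false : Bool) = true) by simp),
              if_neg (show ¬((false : Bool) = true) by simp)]
          have hsplit : s.drop i ++ ['\n'] = ((s.drop i).take wn) ++ (s.drop (i + wn) ++ ['\n']) := by
            rw [← List.append_assoc]
            congr 1
            rw [show s.drop (i + wn) = (s.drop i).drop wn from (List.drop_drop).symm]
            exact (List.take_append_drop wn (s.drop i)).symm
          have hfsplit : (s.drop i ++ ['\n']).findIdx? (pvSeps.contains ·)
              = ((s.drop (i + wn) ++ ['\n']).findIdx? (pvSeps.contains ·)).map (fun q => q + wn) := by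
            rw [hsplit, List.findIdx?_append, List.findIdx?_eq_none_iff.mpr hnosub,
                Option.none_or, hsublen]
          have hdlen2 : (s.drop (i + wn)).length = k - wn := by rw [List.length_drop]; omega
          cases hu : (s.drop (i + wn)).findIdx? (pvSeps.contains ·) with
          | some d =>
            have hdlt : d < k - wn := by
              rcases List.findIdx?_eq_some_iff_getElem.mp hu with ⟨hlt, _, _⟩
              rwa [hdlen2] at hlt
            have hfull : (s.drop i ++ ['\n']).findIdx? (pvSeps.contains ·) = some (d + wn) := by
              rw [hfsplit, List.findIdx?_append, hu]
              simp
            rw [hfull]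
            dsimp only
            obtain ⟨c3, hc3⟩ : ∃ c, s[i + wn + d]? = some c := ⟨_, List.getElem?_eq_getElem (by omega)⟩
            have hc3nl : c3 ≠ '\n' := fun h => hnl (h ▸ List.mem_of_getElem? hc3)
            have hA3f : (PySem.List.pyGet? (s.drop i ++ ['\n']) ((d + wn : Nat) : Int) == some '\n') = false := by
              rw [PySem.List.pyGet?_natCast, List.getElem?_append_left (by omega), List.getElem?_drop,
                  show i + (d + wn) = i + wn + d by omega, hc3]
              simp [hc3nl]
            rw [hA3f, if_neg (by simp)]
            rw [show ((d + wn : Nat) : Int) + 1 = ((d + wn + 1 : Nat) : Int) by push_cast; ring]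
            rw [PySem.List.slice_from_natCast, List.drop_append_of_le_length (by omega), List.drop_drop]
            rw [PySem.List.slice_zero_start, PySem.List.slice_to_natCast,
                List.take_append_of_le_length (by omega)]
            rw [show (i : Int) + (wn : Int) = ((i + wn : Nat) : Int) by push_cast; ring]
            rw [scanFwd_spec s (s.length + 1) (i + wn) (by omega) (by omega), hu]
            dsimp only
            rw [if_neg (show ¬(((i + wn + d : Nat) : Int) = (s.length : Int)) by intro hcast; omega)]
            rw [show ((i + wn + d : Nat) : Int) + 1 = ((i + wn + d + 1 : Nat) : Int) by push_cast; ring]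
            rw [PySem.List.slice_natCast, show i + wn + d + 1 - i = d + wn + 1 by omega]
            rw [show i + (d + wn + 1) = i + wn + d + 1 by omega]
            have h := IH (k - (d + wn + 1)) (by omega) (i + wn + d + 1)
              (acc ++ [(s.drop i).take (d + wn + 1)]) fa' fb' (by omega) (by omega) (by omega)
            rw [show ((k - (d + wn + 1) : Nat) : Int) = (k : Int) - ((d + wn + 1 : Nat) : Int) by omega] at h
            rw [show i + wn + d + 1 = i + (d + wn + 1) by omega] at h
            rw [show i + (d + wn + 1) = i + wn + d + 1 by omega] at h
            exact h
          | none =>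
            have hsing : (['\n'] : List Char).findIdx? (pvSeps.contains ·) = some 0 := by decide
            have hfull : (s.drop i ++ ['\n']).findIdx? (pvSeps.contains ·) = some k := by
              rw [hfsplit, List.findIdx?_append, hu, hsing, Option.none_or, Option.map_some,
                  Option.map_some, hdlen2]
              congr 1
              omega
            rw [hfull]
            dsimp only
            have hA4 : PySem.List.pyGet? (s.drop i ++ ['\n']) ((k : Nat) : Int) = some '\n' := by
              have h := PySem.List.pyGet?_append_length (s.drop i) ([] : List Char) '\n'
              rw [hdlen] at h
              exact h
            rw [hA4, if_pos (by simp)]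
            rw [PySem.List.slice_zero_start, PySem.List.slice_to_natCast,
                List.take_append_of_le_length (by omega), List.take_of_length_le (by omega)]
            rw [show (i : Int) + (wn : Int) = ((i + wn : Nat) : Int) by push_cast; ring]
            rw [scanFwd_spec s (s.length + 1) (i + wn) (by omega) (by omega), hu]
            dsimp only
            rw [if_pos rfl]
            rw [PySem.List.slice_from_natCast]
            obtain ⟨fa2, rfl⟩ : ∃ m, fa' = m + 1 := ⟨fa' - 1, by omega⟩
            obtain ⟨fb2, rfl⟩ : ∃ m, fb' = m + 1 := ⟨fb' - 1, by omega⟩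
            simp only [loopA, loopB]
            rw [if_neg (show ¬((0 : Int) > (wn : Int)) by omega),
                if_neg (show ¬((s.length : Int) - (s.length : Int) > (wn : Int)) by omega)]
            show acc ++ [(s.drop i)] ++ [PySem.List.slice ([] : List Char) (some 0) (some 0)]
                = acc ++ [(s.drop i)] ++ [PySem.List.slice s (some (s.length : Int)) none]
            rw [show PySem.List.slice ([] : List Char) (some 0) (some 0) = ([] : List Char) from rfl,
                PySem.List.slice_from_natCast, List.drop_length]

-- ===== VERDICT (by name: the statement is the Claim_ definition above) =====
theorem soft_wrap_spec : Claim_equal_soft_wrap := by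
  unfold Claim_equal_soft_wrap
  intro text width bw _hdom hpre
  obtain ⟨hnlF, hw1⟩ := hpre
  unfold Spec_soft_wrap soft_wrap soft_wrap_alt
  rw [hnlF]
  simp only [Bool.false_eq_true, if_false]
  have hnl : '\n' ∉ text.toList := by
    intro hmem
    obtain ⟨l1, l2, heq⟩ := List.append_of_mem hmem
    have : PySem.Str.isIn "\n" text = true := by
      rw [PySem.Str.isIn_iff_infix]
      exact ⟨l1, l2, by simp [heq]⟩
    rw [this] at hnlF
    exact absurd hnlF (by simp)
  have hwcast : width = ((width.toNat : Nat) : Int) := (Int.toNat_of_nonneg (by omega)).symm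
  rw [hwcast]
  have hlen : (text.toList ++ ['\n']).length = text.toList.length + 1 := by simp
  have := loop_eq text.toList bw width.toNat (by omega) hnl text.toList.length 0 []
      (text.toList.length + 2) (text.toList.length + 1) (by omega) (by omega) (by omega)
  simp only [List.drop_zero] at this
  rw [hlen, show ((text.toList.length + 1 : Nat) : Int) - 1 = (text.toList.length : Int) by push_cast; ring]
  rw [show ((0 : Nat) : Int) = (0 : Int) from rfl] at this
  show (finishA _).map String.ofList = (finishB _ _).map String.ofList
  exact congrArg _ this
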